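-- pv_equiv track=rewrite | github.com/nessalc/AdventOfCode | advent2021/day14.py | find_counts
-- ===== SOURCE A (Python) =====
-- from collections import Counter
--
-- def find_counts(polymer, rule_dict):
--     c = Counter(rule_dict.keys())
--     for pair in rule_dict.keys():
--         if pair in polymer:
--             count = polymer.count(pair)
--         else:
--             count = 0
--         c[pair] = count
--     return c
-- ===== SOURCE B (Python) =====
-- from collections import Counter
--
-- def find_counts(polymer, rule_dict):
--     counts = {pair: 0 for pair in rule_dict}
--     next_ok = {pair: 0 for pair in rule_dict}
--     n = len(polymer)
--     for L in {len(pair) for pair in rule_dict}: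
--         for i in range(n - L + 1):
--             sub = polymer[i:i+L]
--             if sub in counts and i >= next_ok[sub]:
--                 counts[sub] += 1
--                 next_ok[sub] = i + L
--     return Counter(counts)
-- ===== Notes on version B (the rewrite author's own statement) =====
-- stated objective: faster
-- what changed: Instead of calling polymer.count(pair) once per rule key (a fresh scan of the polymer for every key), B makes one indexed pass over the polymer per distinct key length, looking the current substring up in a hash table of all keys at once and tracking each key's next allowed match position to reproduce non-overlapping counting exactly.
import Mathlib
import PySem

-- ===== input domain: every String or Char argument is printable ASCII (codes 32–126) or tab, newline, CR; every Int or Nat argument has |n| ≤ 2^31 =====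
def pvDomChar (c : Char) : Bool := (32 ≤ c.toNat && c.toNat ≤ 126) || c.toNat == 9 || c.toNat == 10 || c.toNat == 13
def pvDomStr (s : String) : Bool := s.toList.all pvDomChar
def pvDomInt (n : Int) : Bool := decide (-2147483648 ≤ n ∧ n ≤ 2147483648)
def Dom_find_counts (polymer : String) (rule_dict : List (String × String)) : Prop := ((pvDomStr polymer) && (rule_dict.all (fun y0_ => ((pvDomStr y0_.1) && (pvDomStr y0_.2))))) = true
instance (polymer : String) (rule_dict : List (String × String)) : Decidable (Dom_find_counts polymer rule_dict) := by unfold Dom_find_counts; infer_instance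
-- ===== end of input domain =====

-- B replaces A's per-rule-key substring counting over the polymer by, per distinct key length L,
-- a single indexed pass over the polymer that looks the current length-L substring up in a hash
-- table of all rule keys at once, tracking each key's next allowed match position so that the
-- non-overlapping counts of Python's str.count are reproduced exactly.

-- ===== PORT A =====
def find_counts (polymer : String) (rule_dict : List (String × String)) : List (String × Int) :=
  -- c = Counter(rule_dict.keys())
  let c := PySem.Dict.counter (PySem.Dict.ofList rule_dict).keys
  -- for pair in rule_dict.keys(): if pair in polymer: count = polymer.count(pair) else: count = 0; c[pair] = count
  let c := (PySem.Dict.ofList rule_dict).keys.foldl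
      (fun c pair =>
        c.insert pair (if PySem.Str.isIn pair polymer
                       then ((PySem.Str.count polymer pair : Nat) : Int) else 0)) c
  c.items

-- ===== PORT B =====
-- B's inner-loop body: sub = polymer[i:i+L]; if sub in counts and i >= next_ok[sub]: …
def pvInner (polymer : String) (L : Int)
    (st : PySem.Dict String Int × PySem.Dict String Int) (i : Int) :
    PySem.Dict String Int × PySem.Dict String Int :=
  let sub := PySem.Str.slice polymer (some i) (some (i + L))
  if st.1.contains sub && decide (st.2.getD sub 0 ≤ i) then
    (st.1.insert sub (st.1.getD sub 0 + 1), st.2.insert sub (i + L))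
  else st

-- B's outer-loop body: for i in range(n - L + 1): …
def pvOuter (polymer : String) (n : Int)
    (st : PySem.Dict String Int × PySem.Dict String Int) (L : Int) :
    PySem.Dict String Int × PySem.Dict String Int :=
  (PySem.List.pyRange 0 (n - L + 1)).foldl (pvInner polymer L) st

def find_counts_alt (polymer : String) (rule_dict : List (String × String)) : List (String × Int) :=
  let keys := (PySem.Dict.ofList rule_dict).keys
  -- counts = {pair: 0 for pair in rule_dict}; next_ok = {pair: 0 for pair in rule_dict}
  let counts := keys.foldl (fun d k => d.insert k (0 : Int)) PySem.Dict.empty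
  let next_ok := keys.foldl (fun d k => d.insert k (0 : Int)) PySem.Dict.empty
  -- for L in {len(pair) for pair in rule_dict}: for i in range(n - L + 1): …
  let st := (PySem.Set.ofList (keys.map PySem.Str.len)).foldl
      (pvOuter polymer (PySem.Str.len polymer)) (counts, next_ok)
  -- return Counter(counts)
  st.1.items

-- ===== PRECONDITION & SPEC =====
def Spec_find_counts (polymer : String) (rule_dict : List (String × String)) (out : List (String × Int)) : Prop := out = find_counts_alt polymer rule_dict
instance (polymer : String) (rule_dict : List (String × String)) (out : List (String × Int)) : Decidable (Spec_find_counts polymer rule_dict out) := by unfold Spec_find_counts; infer_instance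

-- ===== CLAIM (what is proved, stated in full; the proofs are below) =====
def Claim_equal_find_counts : Prop := ∀ (polymer : String) (rule_dict : List (String × String)), Dom_find_counts polymer rule_dict → Spec_find_counts polymer rule_dict (find_counts polymer rule_dict)

-- ===== LEMMAS AND PROOFS =====

theorem pv_go_acc (sub : List Char) :
    ∀ (fuel : Nat) (l : List Char) (acc : Nat),
      PySem.Chars.count.go sub fuel l acc = acc + PySem.Chars.count.go sub fuel l 0 := by
  intro fuel
  induction fuel with
  | zero => intro l acc; simp [PySem.Chars.count.go]
  | succ n ih =>
    intro l acc
    cases l with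
    | nil => simp [PySem.Chars.count.go]
    | cons c t =>
      simp only [PySem.Chars.count.go]
      by_cases h : sub.isPrefixOf (c :: t)
      · simp only [h, if_true]
        rw [ih _ (acc + 1), ih _ (0 + 1)]
        omega
      · simp only [h]
        exact ih t acc

theorem pv_go_fuel (sub : List Char) (hsub : sub ≠ []) :
    ∀ (f1 f2 : Nat) (l : List Char) (acc : Nat), l.length ≤ f1 → l.length ≤ f2 →
      PySem.Chars.count.go sub f1 l acc = PySem.Chars.count.go sub f2 l acc := by
  intro f1
  induction f1 with
  | zero =>
    intro f2 l acc h1 h2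
    have : l = [] := by cases l <;> simp_all
    subst this
    cases f2 <;> simp [PySem.Chars.count.go]
  | succ n ih =>
    intro f2 l acc h1 h2
    cases l with
    | nil => cases f2 <;> simp [PySem.Chars.count.go]
    | cons c t =>
      cases f2 with
      | zero => simp at h2
      | succ m =>
        simp only [PySem.Chars.count.go]
        by_cases h : sub.isPrefixOf (c :: t)
        · simp only [h, if_true]
          have hlen : sub.length ≥ 1 := by cases sub <;> simp_all
          simp only [List.length_cons] at h1 h2
          have hd : ((c :: t).drop sub.length).length ≤ n := by
            simp only [List.length_drop, List.length_cons]
            omega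
          have hd2 : ((c :: t).drop sub.length).length ≤ m := by
            simp only [List.length_drop, List.length_cons]
            omega
          exact ih m _ _ hd hd2
        · simp only [h]
          exact ih m t acc (by simp at h1; omega) (by simp at h2; omega)

theorem pv_count_nil (sub : List Char) (hsub : sub ≠ []) :
    PySem.Chars.count [] sub = 0 := by
  simp [PySem.Chars.count, PySem.Chars.count.go, hsub]

theorem pv_count_cons (sub : List Char) (hsub : sub ≠ []) (c : Char) (t : List Char) :
    PySem.Chars.count (c :: t) sub =
      if sub.isPrefixOf (c :: t) then 1 + PySem.Chars.count ((c :: t).drop sub.length) sub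
      else PySem.Chars.count t sub := by
  have hE : sub.isEmpty = false := by cases sub <;> simp_all
  simp only [PySem.Chars.count, hE, Bool.false_eq_true, if_false]
  have hlen1 : sub.length ≥ 1 := by cases sub <;> simp_all
  simp only [List.length_cons, PySem.Chars.count.go]
  by_cases h : sub.isPrefixOf (c :: t)
  · simp only [h, if_true]
    rw [pv_go_acc]
    have : PySem.Chars.count.go sub t.length ((c :: t).drop sub.length) 0
        = PySem.Chars.count.go sub ((c :: t).drop sub.length).length ((c :: t).drop sub.length) 0 := by
      apply pv_go_fuel sub hsub
      · simp only [List.length_drop]; simp; omega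
      · exact le_refl _
    omega
  · simp [h]

theorem pv_count_small (sub : List Char) (hsub : sub ≠ []) :
    ∀ (l : List Char), l.length < sub.length → PySem.Chars.count l sub = 0 := by
  intro l
  induction l with
  | nil => intro _; exact pv_count_nil sub hsub
  | cons c t ih =>
    intro h
    rw [pv_count_cons sub hsub]
    have hp : ¬ sub.isPrefixOf (c :: t) := by
      intro hpre
      have : sub <+: (c :: t) := List.isPrefixOf_iff_prefix.mp hpre
      have hle := this.length_le
      simp only [List.length_cons] at h hle
      omega
    simp only [hp]
    exact ih (by simp only [List.length_cons] at h; omega)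

theorem pv_count_not_infix (sub : List Char) (hsub : sub ≠ []) :
    ∀ (l : List Char), ¬ sub <:+: l → PySem.Chars.count l sub = 0 := by
  intro l
  induction l with
  | nil => intro _; exact pv_count_nil sub hsub
  | cons c t ih =>
    intro h
    rw [pv_count_cons sub hsub]
    have hp : ¬ sub.isPrefixOf (c :: t) := by
      intro hpre
      exact h (List.isPrefixOf_iff_prefix.mp hpre).isInfix
    simp only [hp]
    exact ih (fun hi => h (hi.trans ((List.suffix_cons c t).isInfix)))

theorem pv_count_empty (l : List Char) : PySem.Chars.count l [] = l.length + 1 := by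
  simp [PySem.Chars.count]

theorem pv_slice_eq (polymer k : String) (i L : Int) (h0 : 0 ≤ i) (hL : 0 ≤ L) :
    (PySem.Str.slice polymer (some i) (some (i + L)) = k)
      ↔ (polymer.toList.drop i.toNat).take L.toNat = k.toList := by
  have h1 : PySem.Str.slice polymer (some i) (some (i + L))
      = String.ofList ((polymer.toList.drop i.toNat).take L.toNat) := by
    simp only [PySem.Str.slice, PySem.Chars.slice]
    rw [PySem.List.slice_toNat _ h0 (by omega)]
    have h2 : (i + L).toNat - i.toNat = L.toNat := by omega
    rw [h2]
  rw [h1]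
  constructor
  · intro h
    rw [← h, String.toList_ofList]
  · intro h
    rw [h, String.ofList_toList]

def pvStep (polymer k : String) (L : Int) (p : Int × Int) (i : Int) : Int × Int :=
  if PySem.Str.slice polymer (some i) (some (i + L)) = k ∧ p.2 ≤ i then (p.1 + 1, i + L) else p

theorem pv_prefix_iff (polymer k : String) (i : Int) (h0 : 0 ≤ i) :
    (PySem.Str.slice polymer (some i) (some (i + (k.toList.length : Int))) = k)
      ↔ (polymer.toList.drop i.toNat).take k.toList.length = k.toList := by
  rw [pv_slice_eq polymer k i _ h0 (by positivity)]
  have hlen : ((k.toList.length : Int)).toNat = k.toList.length := by omega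
  rw [hlen]

theorem pv_greedy (polymer k : String) (hk : k.toList ≠ []) :
    ∀ (m : Nat) (a c0 nx : Int), 0 ≤ a → 0 ≤ nx →
      a + m = (polymer.toList.length : Int) - (k.toList.length : Int) + 1 →
      ((PySem.List.pyRange a ((polymer.toList.length : Int) - (k.toList.length : Int) + 1)).foldl
          (pvStep polymer k (k.toList.length : Int)) (c0, nx)).1
        = c0 + (PySem.Chars.count (polymer.toList.drop (max a nx).toNat) k.toList : Int) := by
  have hL1 : 1 ≤ (k.toList.length : Int) := by
    have : k.toList.length ≠ 0 := fun h => hk (List.length_eq_zero_iff.mp h)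
    omega
  intro m
  induction m with
  | zero =>
    intro a c0 nx ha hnx hsum
    have hrange : PySem.List.pyRange a ((polymer.toList.length : Int) - (k.toList.length : Int) + 1) = [] := by
      rw [PySem.List.pyRange_of_pos a _ (by norm_num : (0:Int) < 1)]
      have : ¬ a < (polymer.toList.length : Int) - (k.toList.length : Int) + 1 := by omega
      rw [if_neg this]
      simp
    rw [hrange]
    simp only [List.foldl_nil]
    have hz : PySem.Chars.count (polymer.toList.drop (max a nx).toNat) k.toList = 0 := by
      apply pv_count_small _ hk
      have h1 : a.toNat ≤ (max a nx).toNat := by omega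
      simp only [List.length_drop]
      omega
    rw [hz]
    omega
  | succ m ih =>
    intro a c0 nx ha hnx hsum
    have hlt : a < (polymer.toList.length : Int) - (k.toList.length : Int) + 1 := by omega
    rw [PySem.List.pyRange_one_cons hlt]
    simp only [List.foldl_cons]
    by_cases hcnx : nx ≤ a
    · have hmax : max a nx = a := by omega
      by_cases hsl : PySem.Str.slice polymer (some a) (some (a + (k.toList.length : Int))) = k
      · -- a match at position a: count one and jump past it
        have hstep : pvStep polymer k (k.toList.length : Int) (c0, nx) a = (c0 + 1, a + (k.toList.length : Int)) := by
          simp only [pvStep]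
          rw [if_pos ⟨hsl, hcnx⟩]
        rw [hstep]
        rw [ih (a + 1) (c0 + 1) (a + (k.toList.length : Int)) (by omega) (by omega) (by omega)]
        have hmax2 : max (a + 1) (a + (k.toList.length : Int)) = a + (k.toList.length : Int) := by omega
        rw [hmax2, hmax]
        have hpre : k.toList <+: polymer.toList.drop a.toNat := by
          rw [List.prefix_iff_eq_take]
          exact ((pv_prefix_iff polymer k a ha).mp hsl).symm
        have hcnt : PySem.Chars.count (polymer.toList.drop a.toNat) k.toList
            = 1 + PySem.Chars.count (polymer.toList.drop (a + (k.toList.length : Int)).toNat) k.toList := by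
          have hne : polymer.toList.drop a.toNat ≠ [] := by
            intro hnil
            have hll := congrArg List.length hnil
            simp only [List.length_drop, List.length_nil] at hll
            omega
          obtain ⟨c, t, hd⟩ := List.exists_cons_of_ne_nil hne
          rw [hd, pv_count_cons _ hk, if_pos (by rw [← hd]; exact List.isPrefixOf_iff_prefix.mpr hpre)]
          rw [← hd, List.drop_drop]
          have h2 : a.toNat + k.toList.length = (a + (k.toList.length : Int)).toNat := by omega
          rw [h2]
        rw [hcnt]
        push_cast
        ring
      · -- no match at position a: move one character forward
        have hstep : pvStep polymer k (k.toList.length : Int) (c0, nx) a = (c0, nx) := by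
          simp only [pvStep]
          rw [if_neg (by intro hcon; exact hsl hcon.1)]
        rw [hstep]
        rw [ih (a + 1) c0 nx (by omega) hnx (by omega)]
        have hmax2 : max (a + 1) nx = a + 1 := by omega
        rw [hmax2, hmax]
        have hcnt : PySem.Chars.count (polymer.toList.drop a.toNat) k.toList
            = PySem.Chars.count (polymer.toList.drop (a + 1).toNat) k.toList := by
          have hne : polymer.toList.drop a.toNat ≠ [] := by
            intro hnil
            have := congrArg List.length hnil
            simp only [List.length_drop, List.length_nil] at this
            omega
          obtain ⟨c, t, hd⟩ := List.exists_cons_of_ne_nil hne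
          have hnp : ¬ k.toList.isPrefixOf (polymer.toList.drop a.toNat) := by
            intro hp
            apply hsl
            rw [pv_prefix_iff polymer k a ha]
            have hpr := List.isPrefixOf_iff_prefix.mp hp
            rw [List.prefix_iff_eq_take] at hpr
            exact hpr.symm
          rw [hd] at hnp
          rw [hd, pv_count_cons _ hk, if_neg hnp]
          have ht : polymer.toList.drop (a + 1).toNat = t := by
            have h1 : (a + 1).toNat = a.toNat + 1 := by omega
            rw [h1, List.drop_add_one_eq_tail_drop, hd]
            rfl
          rw [ht]
        rw [hcnt]
    · -- waiting out a pending skip: nx > a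
      have hstep : pvStep polymer k (k.toList.length : Int) (c0, nx) a = (c0, nx) := by
        simp only [pvStep]
        rw [if_neg (by intro hcon; exact hcnx hcon.2)]
      rw [hstep]
      rw [ih (a + 1) c0 nx (by omega) hnx (by omega)]
      have hm : max (a + 1) nx = max a nx := by omega
      rw [hm]

theorem pv_slice_zero (polymer : String) (a : Int) (h0 : 0 ≤ a) :
    PySem.Str.slice polymer (some a) (some (a + 0)) = "" := by
  have h := (pv_slice_eq polymer "" a 0 h0 le_rfl).mpr (by simp)
  exact h

theorem pv_greedy_nil (polymer : String) :
    ∀ (m : Nat) (a c0 nx : Int), 0 ≤ a → nx ≤ a →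
      a + m = (polymer.toList.length : Int) + 1 →
      ((PySem.List.pyRange a ((polymer.toList.length : Int) + 1)).foldl
          (pvStep polymer "" 0) (c0, nx)).1 = c0 + m := by
  intro m
  induction m with
  | zero =>
    intro a c0 nx ha hnx hsum
    have hrange : PySem.List.pyRange a ((polymer.toList.length : Int) + 1) = [] := by
      rw [PySem.List.pyRange_of_pos a _ (by norm_num : (0:Int) < 1)]
      have : ¬ a < (polymer.toList.length : Int) + 1 := by omega
      rw [if_neg this]
      simp
    rw [hrange]
    simp
  | succ m ih =>
    intro a c0 nx ha hnx hsum
    have hlt : a < (polymer.toList.length : Int) + 1 := by omega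
    rw [PySem.List.pyRange_one_cons hlt]
    simp only [List.foldl_cons]
    have hstep : pvStep polymer "" 0 (c0, nx) a = (c0 + 1, a + 0) := by
      simp only [pvStep]
      rw [if_pos ⟨pv_slice_zero polymer a ha, hnx⟩]
    rw [hstep]
    rw [ih (a + 1) (c0 + 1) (a + 0) (by omega) (by omega) (by omega)]
    push_cast
    ring

theorem pv_greedy_full (polymer k : String) :
    ((PySem.List.pyRange 0 (PySem.Str.len polymer - PySem.Str.len k + 1)).foldl
        (pvStep polymer k (PySem.Str.len k)) ((0 : Int), (0 : Int))).1
      = ((PySem.Str.count polymer k : Nat) : Int) := by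
  rw [PySem.Str.count_eq, PySem.Str.len_eq, PySem.Str.len_eq]
  by_cases hk : k.toList = []
  · have hk' : k = "" := by rw [← String.ofList_toList (s := k), hk]
    subst hk'
    rw [hk, pv_count_empty]
    simp only [List.length_nil, Nat.cast_zero, sub_zero]
    have := pv_greedy_nil polymer (polymer.toList.length + 1) 0 0 0 le_rfl le_rfl (by push_cast; ring)
    rw [this]
    push_cast
    ring
  · by_cases hle : k.toList.length ≤ polymer.toList.length
    · have := pv_greedy polymer k hk (polymer.toList.length - k.toList.length + 1) 0 0 0
        le_rfl le_rfl (by push_cast; omega)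
      rw [this]
      norm_num
    · have hrange : PySem.List.pyRange 0 ((polymer.toList.length : Int) - (k.toList.length : Int) + 1) = [] := by
        rw [PySem.List.pyRange_of_pos 0 _ (by norm_num : (0:Int) < 1)]
        have : ¬ (0:Int) < (polymer.toList.length : Int) - (k.toList.length : Int) + 1 := by omega
        rw [if_neg this]
        simp
      rw [hrange]
      simp only [List.foldl_nil]
      rw [pv_count_small _ hk _ (by omega)]
      simp

theorem pv_step_const (polymer k : String) (L : Int) (hL : 0 ≤ L) (hne : L ≠ (k.toList.length : Int)) :
    ∀ (is : List Int) (p : Int × Int),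
      (∀ i ∈ is, 0 ≤ i ∧ i + L ≤ (polymer.toList.length : Int)) →
      is.foldl (pvStep polymer k L) p = p := by
  intro is
  induction is with
  | nil => intro p _; rfl
  | cons i rest ih =>
    intro p hmem
    obtain ⟨h0, hn⟩ := hmem i (by simp)
    have hstep : pvStep polymer k L p i = p := by
      simp only [pvStep]
      rw [if_neg]
      rintro ⟨hs, -⟩
      rw [pv_slice_eq _ _ _ _ h0 hL] at hs
      have hlen := congrArg List.length hs
      simp only [List.length_take, List.length_drop] at hlen
      omega
    simp only [List.foldl_cons, hstep]
    exact ih p (fun j hj => hmem j (by simp [hj]))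

theorem pv_find_map (g : String → Int) :
    ∀ (keys : List String) (x : String), x ∈ keys →
      (keys.map (fun y => (y, g y))).find? (fun p => p.1 == x) = some (x, g x) := by
  intro keys
  induction keys with
  | nil => intro x hx; simp at hx
  | cons y ys ih =>
    intro x hx
    simp only [List.map_cons, List.find?_cons]
    by_cases hyx : y = x
    · subst hyx
      simp
    · have : ((y, g y).1 == x) = false := by simp [hyx]
      rw [this]
      exact ih x ((List.mem_cons.mp hx).resolve_left (fun h => hyx h.symm))

theorem pv_shape_keys {keys : List String} {c : PySem.Dict String Int} {g : String → Int}
    (h : c.items = keys.map (fun x => (x, g x))) : c.keys = keys := by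
  simp [PySem.Dict.keys, h, List.map_map, Function.comp_def]

theorem pv_shape_contains {keys : List String} {c : PySem.Dict String Int} {g : String → Int}
    (h : c.items = keys.map (fun x => (x, g x))) (x : String) :
    c.contains x = true ↔ x ∈ keys := by
  rw [PySem.Dict.contains_iff_mem_keys, pv_shape_keys h]

theorem pv_shape_getD {keys : List String} {c : PySem.Dict String Int} {g : String → Int}
    (h : c.items = keys.map (fun x => (x, g x))) {x : String} (hx : x ∈ keys) :
    c.getD x 0 = g x := by
  simp only [PySem.Dict.getD, PySem.Dict.get?, h]
  rw [pv_find_map g keys x hx]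
  rfl

theorem pv_shape_insert {keys : List String} {c : PySem.Dict String Int} {g : String → Int}
    (h : c.items = keys.map (fun x => (x, g x))) {x : String} (hx : x ∈ keys) (v : Int) :
    (c.insert x v).items = keys.map (fun y => (y, if y = x then v else g y)) := by
  rw [PySem.Dict.items_insert_of_contains _ v ((pv_shape_contains h x).mpr hx), h, List.map_map]
  apply List.map_congr_left
  intro y _
  by_cases hyx : y = x
  · subst hyx; simp
  · simp [hyx]

theorem pv_inner_proj (polymer : String) (keys : List String) (L : Int) (k : String)
    (hk : k ∈ keys) :
    ∀ (is : List Int) (c nx : PySem.Dict String Int) (g : String → Int),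
      c.items = keys.map (fun x => (x, g x)) →
      ∃ g' : String → Int,
        (is.foldl (pvInner polymer L) (c, nx)).1.items = keys.map (fun x => (x, g' x)) ∧
        (((is.foldl (pvInner polymer L) (c, nx)).1.getD k 0,
          (is.foldl (pvInner polymer L) (c, nx)).2.getD k 0)
            = is.foldl (pvStep polymer k L) (c.getD k 0, nx.getD k 0)) := by
  intro is
  induction is with
  | nil =>
    intro c nx g hshape
    exact ⟨g, hshape, rfl⟩
  | cons i rest ih =>
    intro c nx g hshape
    simp only [List.foldl_cons]
    by_cases hc : c.contains (PySem.Str.slice polymer (some i) (some (i + L))) = true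
    · by_cases hx : nx.getD (PySem.Str.slice polymer (some i) (some (i + L))) 0 ≤ i
      · -- the real loop updates key `sub`
        have hreal : pvInner polymer L (c, nx) i
            = (c.insert (PySem.Str.slice polymer (some i) (some (i + L)))
                 (c.getD (PySem.Str.slice polymer (some i) (some (i + L))) 0 + 1),
               nx.insert (PySem.Str.slice polymer (some i) (some (i + L))) (i + L)) := by
          simp [pvInner, hc, hx]
        have hsubmem : PySem.Str.slice polymer (some i) (some (i + L)) ∈ keys :=
          (pv_shape_contains hshape _).mp hc
        have hsh1 := pv_shape_insert hshape hsubmem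
          (c.getD (PySem.Str.slice polymer (some i) (some (i + L))) 0 + 1)
        obtain ⟨g', hsh, hproj⟩ := ih _ _ _ hsh1
        refine ⟨g', by rw [hreal]; exact hsh, ?_⟩
        rw [hreal, hproj]
        congr 1
        -- starting pure state agrees with one pvStep
        rw [PySem.Dict.getD_insert, PySem.Dict.getD_insert]
        by_cases hek : k = PySem.Str.slice polymer (some i) (some (i + L))
        · rw [if_pos hek, if_pos hek]
          simp only [pvStep]
          rw [if_pos ⟨hek.symm, by rw [hek]; exact hx⟩, hek]
        · rw [if_neg hek, if_neg hek]
          simp only [pvStep]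
          rw [if_neg]
          rintro ⟨hs, -⟩
          exact hek hs.symm
      · -- next-allowed position not reached: no update
        have hreal : pvInner polymer L (c, nx) i = (c, nx) := by
          simp [pvInner, hx]
        obtain ⟨g', hsh, hproj⟩ := ih c nx g hshape
        refine ⟨g', by rw [hreal]; exact hsh, ?_⟩
        rw [hreal, hproj]
        congr 1
        simp only [pvStep]
        rw [if_neg]
        rintro ⟨hs, hle⟩
        rw [hs] at hx
        exact hx hle
    · -- substring not a rule key: no update
      have hreal : pvInner polymer L (c, nx) i = (c, nx) := by
        simp [pvInner, hc]
      obtain ⟨g', hsh, hproj⟩ := ih c nx g hshape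
      refine ⟨g', by rw [hreal]; exact hsh, ?_⟩
      rw [hreal, hproj]
      congr 1
      simp only [pvStep]
      rw [if_neg]
      rintro ⟨hs, -⟩
      rw [hs] at hc
      exact hc ((pv_shape_contains hshape k).mpr hk)

theorem pv_outer_proj (polymer : String) (keys : List String) (k : String) (hk : k ∈ keys) :
    ∀ (Ls : List Int) (c nx : PySem.Dict String Int) (g : String → Int),
      c.items = keys.map (fun x => (x, g x)) →
      ∃ g' : String → Int,
        (Ls.foldl (pvOuter polymer (PySem.Str.len polymer)) (c, nx)).1.items
            = keys.map (fun x => (x, g' x)) ∧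
        (((Ls.foldl (pvOuter polymer (PySem.Str.len polymer)) (c, nx)).1.getD k 0,
          (Ls.foldl (pvOuter polymer (PySem.Str.len polymer)) (c, nx)).2.getD k 0)
            = Ls.foldl (fun p L => (PySem.List.pyRange 0 (PySem.Str.len polymer - L + 1)).foldl
                (pvStep polymer k L) p) (c.getD k 0, nx.getD k 0)) := by
  intro Ls
  induction Ls with
  | nil =>
    intro c nx g hshape
    exact ⟨g, hshape, rfl⟩
  | cons L Ls ih =>
    intro c nx g hshape
    simp only [List.foldl_cons]
    obtain ⟨g1, hsh1, hproj1⟩ := pv_inner_proj polymer keys L k hk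
      (PySem.List.pyRange 0 (PySem.Str.len polymer - L + 1)) c nx g hshape
    have hsplit : pvOuter polymer (PySem.Str.len polymer) (c, nx) L
        = ((pvOuter polymer (PySem.Str.len polymer) (c, nx) L).1,
           (pvOuter polymer (PySem.Str.len polymer) (c, nx) L).2) := rfl
    obtain ⟨g', hsh, hproj⟩ := ih (pvOuter polymer (PySem.Str.len polymer) (c, nx) L).1
      (pvOuter polymer (PySem.Str.len polymer) (c, nx) L).2 g1 (by simp only [pvOuter]; exact hsh1)
    refine ⟨g', ?_, ?_⟩
    · rw [hsplit] at hsh ⊢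
      exact hsh
    · rw [hsplit, hproj]
      simp only [pvOuter]
      rw [hproj1]

theorem pv_pure_outer_const (polymer k : String) :
    ∀ (Ls : List Int) (p : Int × Int), (∀ L ∈ Ls, 0 ≤ L ∧ L ≠ PySem.Str.len k) →
      Ls.foldl (fun p L => (PySem.List.pyRange 0 (PySem.Str.len polymer - L + 1)).foldl
          (pvStep polymer k L) p) p = p := by
  intro Ls
  induction Ls with
  | nil => intro p _; rfl
  | cons L Ls ih =>
    intro p hmem
    obtain ⟨h0, hne⟩ := hmem L (by simp)
    simp only [List.foldl_cons]
    have hconst : (PySem.List.pyRange 0 (PySem.Str.len polymer - L + 1)).foldl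
        (pvStep polymer k L) p = p := by
      apply pv_step_const polymer k L h0
        (by rw [PySem.Str.len_eq] at hne; exact hne)
      intro i hi
      rw [PySem.List.mem_pyRange_iff_of_pos (by norm_num)] at hi
      rw [PySem.Str.len_eq] at hi
      exact ⟨hi.1, by omega⟩
    rw [hconst]
    exact ih p (fun L' hL' => hmem L' (by simp [hL']))

theorem pv_pure_outer (polymer k : String) :
    ∀ (Ls : List Int), (∀ L ∈ Ls, 0 ≤ L) → Ls.Nodup → PySem.Str.len k ∈ Ls →
      (Ls.foldl (fun p L => (PySem.List.pyRange 0 (PySem.Str.len polymer - L + 1)).foldl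
          (pvStep polymer k L) p) ((0 : Int), (0 : Int))).1
        = ((PySem.Str.count polymer k : Nat) : Int) := by
  intro Ls hpos hnd hmem
  obtain ⟨l1, l2, rfl⟩ := List.append_of_mem hmem
  rw [List.foldl_append, List.foldl_cons]
  have hnd1 := hnd
  rw [List.nodup_append] at hnd1
  obtain ⟨hn1, hn2, hdisj⟩ := hnd1
  have hnotin1 : ∀ L ∈ l1, L ≠ PySem.Str.len k := by
    intro L hL heq
    exact hdisj L hL (PySem.Str.len k) (by simp) heq
  have hnotin2 : ∀ L ∈ l2, L ≠ PySem.Str.len k := by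
    intro L hL heq
    rw [List.nodup_cons] at hn2
    exact hn2.1 (by rw [← heq]; exact hL)
  rw [pv_pure_outer_const polymer k l1 _ (fun L hL => ⟨hpos L (by simp [hL]), hnotin1 L hL⟩)]
  have hmid := pv_greedy_full polymer k
  have hend := pv_pure_outer_const polymer k l2
    ((PySem.List.pyRange 0 (PySem.Str.len polymer - PySem.Str.len k + 1)).foldl
      (pvStep polymer k (PySem.Str.len k)) ((0 : Int), (0 : Int)))
    (fun L hL => ⟨hpos L (by simp [hL]), hnotin2 L hL⟩)
  rw [hend, hmid]

theorem pv_ofList_nodup_self_aux {α : Type} [BEq α] [LawfulBEq α] :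
    ∀ (xs s : List α), (s ++ xs).Nodup → xs.foldl PySem.Set.add s = s ++ xs := by
  intro xs
  induction xs with
  | nil => intro s h; simp
  | cons x rest ih =>
    intro s h
    simp only [List.foldl_cons]
    have hx : x ∉ s := by
      intro hmem
      rw [List.nodup_append] at h
      exact h.2.2 x hmem x (by simp) rfl
    have hadd : PySem.Set.add s x = s ++ [x] := by
      simp only [PySem.Set.add]
      rw [if_neg]
      intro hcon
      exact hx (PySem.Set.contains_iff s x |>.mp hcon)
    rw [hadd, ih (s ++ [x]) (by simpa using h)]
    simp

theorem pv_ofList_nodup_self {xs : List String} (h : xs.Nodup) : PySem.Set.ofList xs = xs := by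
  have := pv_ofList_nodup_self_aux xs [] (by simpa using h)
  simpa [PySem.Set.ofList] using this

theorem pv_a_fold (f : String → Int) (keys : List String) :
    ∀ (todo : List String) (c : PySem.Dict String Int) (g : String → Int),
      (∀ x ∈ todo, x ∈ keys) →
      c.items = keys.map (fun x => (x, g x)) →
      ∃ g' : String → Int,
        (todo.foldl (fun c pair => c.insert pair (f pair)) c).items
            = keys.map (fun x => (x, g' x)) ∧
        ∀ x ∈ keys, g' x = if x ∈ todo then f x else g x := by
  intro todo
  induction todo with
  | nil =>
    intro c g _ hshape
    exact ⟨g, hshape, fun x _ => by simp⟩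
  | cons y ys ih =>
    intro c g hmem hshape
    simp only [List.foldl_cons]
    have h1 := pv_shape_insert hshape (hmem y (by simp)) (f y)
    obtain ⟨g', hsh, hval⟩ := ih _ (fun x => if x = y then f y else g x)
      (fun x hx => hmem x (by simp [hx])) h1
    refine ⟨g', hsh, ?_⟩
    intro x hx
    rw [hval x hx]
    by_cases hys : x ∈ ys
    · simp [hys]
    · by_cases hxy : x = y
      · subst hxy
        simp
      · simp [hys, hxy]

theorem pv_init_shape (keys : List String) (hnd : keys.Nodup) :
    (keys.foldl (fun d k => d.insert k (0 : Int)) PySem.Dict.empty).items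
      = keys.map (fun x => (x, (0 : Int))) := by
  have h := PySem.Dict.items_foldl_insert_fresh keys (fun x => x) (fun _ => (0 : Int))
    PySem.Dict.empty (fun a _ => PySem.Dict.contains_empty a) (by simpa using hnd)
  simpa using h

theorem pv_a_items (polymer : String) (rule_dict : List (String × String)) :
    find_counts polymer rule_dict
      = (PySem.Dict.ofList rule_dict).keys.map
          (fun k => (k, if PySem.Str.isIn k polymer
                        then ((PySem.Str.count polymer k : Nat) : Int) else 0)) := by
  have hnd := PySem.Dict.nodup_keys_ofList rule_dict
  have hbase : (PySem.Dict.counter (PySem.Dict.ofList rule_dict).keys).items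
      = (PySem.Dict.ofList rule_dict).keys.map
          (fun x => (x, (((PySem.Dict.ofList rule_dict).keys.count x : Nat) : Int))) := by
    rw [PySem.Dict.items_counter, pv_ofList_nodup_self hnd]
  obtain ⟨g', hsh, hval⟩ := pv_a_fold
    (fun pair => if PySem.Str.isIn pair polymer
                 then ((PySem.Str.count polymer pair : Nat) : Int) else 0)
    (PySem.Dict.ofList rule_dict).keys (PySem.Dict.ofList rule_dict).keys _ _
    (fun x hx => hx) hbase
  have hgoal : find_counts polymer rule_dict
      = (PySem.Dict.ofList rule_dict).keys.map (fun x => (x, g' x)) := hsh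
  rw [hgoal]
  apply List.map_congr_left
  intro x hx
  rw [hval x hx, if_pos hx]

theorem pv_b_items (polymer : String) (rule_dict : List (String × String)) :
    find_counts_alt polymer rule_dict
      = (PySem.Dict.ofList rule_dict).keys.map
          (fun k => (k, ((PySem.Str.count polymer k : Nat) : Int))) := by
  have hnd := PySem.Dict.nodup_keys_ofList rule_dict
  have hsh0 := pv_init_shape (PySem.Dict.ofList rule_dict).keys hnd
  -- useful facts about the set of key lengths
  have hpos : ∀ L ∈ PySem.Set.ofList ((PySem.Dict.ofList rule_dict).keys.map PySem.Str.len),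
      (0 : Int) ≤ L := by
    intro L hL
    rw [PySem.Set.mem_ofList] at hL
    obtain ⟨x, _, rfl⟩ := List.mem_map.mp hL
    rw [PySem.Str.len_eq]
    positivity
  -- shape of the final counts dict, and its value on every key
  by_cases hkeys : (PySem.Dict.ofList rule_dict).keys = []
  · simp only [find_counts_alt, hkeys]
    simp [PySem.Set.ofList, PySem.Set.empty, PySem.Dict.empty]
  · obtain ⟨k0, hk0⟩ := List.exists_mem_of_ne_nil _ hkeys
    obtain ⟨g', hsh, _⟩ := pv_outer_proj polymer (PySem.Dict.ofList rule_dict).keys k0 hk0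
      (PySem.Set.ofList ((PySem.Dict.ofList rule_dict).keys.map PySem.Str.len))
      ((PySem.Dict.ofList rule_dict).keys.foldl (fun d k => d.insert k (0 : Int)) PySem.Dict.empty)
      ((PySem.Dict.ofList rule_dict).keys.foldl (fun d k => d.insert k (0 : Int)) PySem.Dict.empty)
      (fun _ => (0 : Int)) hsh0
    have hgoal : find_counts_alt polymer rule_dict
        = (PySem.Dict.ofList rule_dict).keys.map (fun x => (x, g' x)) := hsh
    rw [hgoal]
    apply List.map_congr_left
    intro k hk
    -- per-key value: project the loop onto key k
    obtain ⟨g'', hsh2, hproj⟩ := pv_outer_proj polymer (PySem.Dict.ofList rule_dict).keys k hk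
      (PySem.Set.ofList ((PySem.Dict.ofList rule_dict).keys.map PySem.Str.len))
      ((PySem.Dict.ofList rule_dict).keys.foldl (fun d k => d.insert k (0 : Int)) PySem.Dict.empty)
      ((PySem.Dict.ofList rule_dict).keys.foldl (fun d k => d.insert k (0 : Int)) PySem.Dict.empty)
      (fun _ => (0 : Int)) hsh0
    have hg' : g' k = g'' k := by
      have h1 := pv_shape_getD hsh hk
      have h2 := pv_shape_getD hsh2 hk
      rw [← h1, ← h2]
    rw [hg']
    have hstart : ((((PySem.Dict.ofList rule_dict).keys.foldl
          (fun d k => d.insert k (0 : Int)) PySem.Dict.empty)).getD k 0,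
        (((PySem.Dict.ofList rule_dict).keys.foldl
          (fun d k => d.insert k (0 : Int)) PySem.Dict.empty)).getD k 0)
        = ((0 : Int), (0 : Int)) := by
      rw [pv_shape_getD hsh0 hk]
    rw [hstart] at hproj
    have hpure := pv_pure_outer polymer k
      (PySem.Set.ofList ((PySem.Dict.ofList rule_dict).keys.map PySem.Str.len))
      hpos (PySem.Set.nodup_ofList _)
      ((PySem.Set.mem_ofList _ _).mpr (List.mem_map.mpr ⟨k, hk, rfl⟩))
    have hv : g'' k = ((PySem.Str.count polymer k : Nat) : Int) := by
      rw [← pv_shape_getD hsh2 hk]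
      have := congrArg Prod.fst hproj
      simp only at this
      rw [this, hpure]
    rw [hv]

theorem pv_value_eq (polymer k : String) :
    (if PySem.Str.isIn k polymer then ((PySem.Str.count polymer k : Nat) : Int) else 0)
      = ((PySem.Str.count polymer k : Nat) : Int) := by
  by_cases h : PySem.Str.isIn k polymer = true
  · rw [if_pos h]
  · rw [if_neg h]
    rw [PySem.Str.count_eq]
    have hfalse : PySem.Chars.isIn k.toList polymer.toList = false := by
      rw [← PySem.Str.isIn_eq]
      exact Bool.not_eq_true _ ▸ (by simpa using h)
    by_cases hk : k.toList = []
    · rw [hk, PySem.Chars.isIn_nil] at hfalse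
      exact absurd hfalse (by simp)
    · rw [pv_count_not_infix _ hk _ (PySem.Chars.isIn_eq_false_iff _ _ |>.mp hfalse)]
      simp


-- ===== VERDICT (by name: the statement is the Claim_ definition above) =====
theorem find_counts_spec : Claim_equal_find_counts := by
  intro polymer rule_dict _
  unfold Spec_find_counts
  rw [pv_a_items, pv_b_items]
  exact List.map_congr_left (fun k _ => by rw [pv_value_eq])
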